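-- pv_equiv track=rewrite | github.com/onehowon/ESTSoftAssignment | 230927/pr2.py | solution
-- ===== SOURCE A (Python) =====
-- from collections import deque
--
-- def solution(cacheSize, cities):
--     # 캐시 사이즈가 0일 경우 예외처리
--     if cacheSize == 0:
--         return len(cities)*5
--
--     t,cache = 0,deque()
--     for i in cities:
--         # 대소문자를 구별하지 않는다는 조건
--         i = i.lower()
--
--         if i in cache:
--             t += 1
--             cache.remove(i)
--             cache.append(i)
--         else:
--             t += 5
--             cache.append(i)
--             # 캐시사이즈보다 캐시가 많다면 맨 앞에것 제거
--             if cacheSize < len(cache):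
--                 cache.popleft()
--
--     return t
-- ===== SOURCE B (Python) =====
-- def solution(cacheSize, cities):
--     # Stack-distance view of LRU: an access is a hit iff, scanning backwards,
--     # fewer than cacheSize distinct cities occur before the previous occurrence.
--     total = 0
--     history = []  # lowered cities so far, most recent first
--     for city in cities:
--         c = city.lower()
--         hit = False
--         seen = set()
--         for x in history:
--             if x == c:
--                 hit = len(seen) < cacheSize
--                 break
--             seen.add(x)
--         total += 1 if hit else 5
--         history.insert(0, c)
--     return total
-- ===== Notes on version B (the rewrite author's own statement) =====
-- stated objective: alternative
-- what changed: Replaces A's maintained LRU deque (membership test, remove/append, popleft eviction) with a stateless stack-distance test: each access scans the access history backwards, counting distinct cities until the previous occurrence; it is a hit iff fewer than cacheSize distinct cities intervene, so no cache structure is ever maintained and the cacheSize==0 special case disappears.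
import Mathlib
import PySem

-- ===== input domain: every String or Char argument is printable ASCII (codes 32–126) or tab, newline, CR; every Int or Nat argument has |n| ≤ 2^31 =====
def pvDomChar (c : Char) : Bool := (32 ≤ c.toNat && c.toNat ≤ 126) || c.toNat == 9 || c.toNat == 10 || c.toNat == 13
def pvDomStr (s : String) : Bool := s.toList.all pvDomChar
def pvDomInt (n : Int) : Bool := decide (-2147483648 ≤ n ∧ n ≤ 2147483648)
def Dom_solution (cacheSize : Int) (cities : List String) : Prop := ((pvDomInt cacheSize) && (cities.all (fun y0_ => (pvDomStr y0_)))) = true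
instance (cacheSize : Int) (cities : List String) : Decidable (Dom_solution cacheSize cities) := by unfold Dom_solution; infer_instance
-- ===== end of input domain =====

-- B replaces A's maintained LRU deque by a stateless stack-distance test (backward scan
-- counting distinct cities up to the previous occurrence); objective: alternative algorithm.

-- ===== PORT A =====
-- loop body of A's for-loop (deque modelled as a list: append at the back, popleft = drop 1;
-- deque.remove removes the first occurrence and is only reached under the membership guard,
-- so remove? is some and getD never takes its default)
def solutionStep (cacheSize : Int) (st : Int × List String) (i : String) : Int × List String :=
  let i := PySem.Str.lower i
  let t := st.1
  let cache := st.2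
  if cache.contains i then
    (t + 1, ((PySem.List.remove? cache i).getD cache) ++ [i])
  else
    let t := t + 5
    let cache := cache ++ [i]
    if cacheSize < (cache.length : Int) then (t, cache.drop 1) else (t, cache)

def solution (cacheSize : Int) (cities : List String) : Int :=
  if cacheSize == 0 then (cities.length : Int) * 5
  else (cities.foldl (solutionStep cacheSize) (0, [])).1

-- ===== PORT B =====
-- inner loop of B: scan the history (most recent first), growing the `seen` set,
-- until the previous occurrence of c is found
def scanHit (cacheSize : Int) (c : String) : List String → PySem.Set String → Bool
  | [], _ => false
  | x :: rest, seen =>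
      if x == c then decide (PySem.Set.len seen < cacheSize)
      else scanHit cacheSize c rest (PySem.Set.add seen x)

def solutionAltStep (cacheSize : Int) (st : Int × List String) (city : String) : Int × List String :=
  let c := PySem.Str.lower city
  let hit := scanHit cacheSize c st.2 PySem.Set.empty
  (st.1 + (if hit then 1 else 5), c :: st.2)

def solution_alt (cacheSize : Int) (cities : List String) : Int :=
  (cities.foldl (solutionAltStep cacheSize) (0, [])).1

-- ===== PRECONDITION & SPEC =====
def Spec_solution (cacheSize : Int) (cities : List String) (out : Int) : Prop := out = solution_alt cacheSize cities
instance (cacheSize : Int) (cities : List String) (out : Int) : Decidable (Spec_solution cacheSize cities out) := by unfold Spec_solution; infer_instance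

-- ===== CLAIM (what is proved, stated in full; the proofs are below) =====
def Claim_equal_solution : Prop := ∀ (cacheSize : Int) (cities : List String), Dom_solution cacheSize cities → Spec_solution cacheSize cities (solution cacheSize cities)

-- ===== LEMMAS AND PROOFS =====

-- dedup keeping FIRST occurrences
def ddf : List String → List String
  | [] => []
  | x :: l => x :: (ddf l).filter (fun y => y != x)

-- the cache A maintains after processing the (reversed, lowered) prefix r
def cacheOf (k : Int) (r : List String) : List String := ((ddf r).take k.toNat).reverse

theorem nodup_ddf : ∀ (l : List String), (ddf l).Nodup := by
  intro l
  induction l with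
  | nil => simp [ddf]
  | cons x l ih =>
    simp only [ddf, List.nodup_cons]
    constructor
    · simp [List.mem_filter]
    · exact ih.filter _

theorem ddf_filter (p : String → Bool) : ∀ (l : List String), ddf (l.filter p) = (ddf l).filter p := by
  intro l
  induction l with
  | nil => simp [ddf]
  | cons x l ih =>
    by_cases h : p x
    · simp only [List.filter_cons, h, ddf, if_true, ih]
      rw [List.filter_comm]
    · simp only [List.filter_cons, h, ddf]
      simp only [Bool.false_eq_true, if_false, ih]
      rw [List.filter_filter]
      congr 1
      funext y
      by_cases hy : y = x
      · subst hy; simp [h]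
      · simp [hy]

theorem take_filter_of_mem {c : String} : ∀ {l : List String} {k : Nat}, l.Nodup → c ∈ l.take k →
    (l.filter (fun y => y != c)).take (k - 1) = (l.take k).filter (fun y => y != c) := by
  intro l
  induction l with
  | nil => intro k _ h; simp at h
  | cons x l ih =>
    intro k hnd hmem
    match k with
    | 0 => simp at hmem
    | k + 1 =>
      simp only [List.take_succ_cons] at hmem ⊢
      rcases List.mem_cons.1 hmem with h | h
      · subst h
        simp only [List.filter_cons, bne_self_eq_false, Bool.false_eq_true, if_false]
        rw [Nat.add_sub_cancel]
        have hx : c ∉ l := (List.nodup_cons.1 hnd).1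
        have h1 : l.filter (fun y => y != c) = l := by
          apply List.filter_eq_self.2
          intro y hy
          simp only [bne_iff_ne, ne_eq]
          intro he; subst he; exact hx hy
        have h2 : (l.take k).filter (fun y => y != c) = l.take k := by
          apply List.filter_eq_self.2
          intro y hy
          simp only [bne_iff_ne, ne_eq]
          intro he; subst he; exact hx (List.mem_of_mem_take hy)
        rw [h1, h2]
      · obtain ⟨k', rfl⟩ : ∃ k', k = k' + 1 := by
          cases k with
          | zero => simp at h
          | succ k' => exact ⟨k', rfl⟩
        have hxc : x ≠ c := by
          intro he; subst he
          exact (List.nodup_cons.1 hnd).1 (List.mem_of_mem_take h)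
        have hxc' : (x != c) = true := by simp [hxc]
        simp only [List.filter_cons, hxc', if_true]
        have e : k' + 1 + 1 - 1 = k' + 1 := by omega
        rw [e, List.take_succ_cons]
        have := ih (k := k' + 1) (List.nodup_cons.1 hnd).2 h
        simp only [Nat.add_sub_cancel] at this
        rw [this]

theorem take_filter_of_not_mem {c : String} : ∀ {l : List String} {k : Nat}, c ∉ l.take k →
    (l.filter (fun y => y != c)).take (k - 1) = l.take (k - 1) := by
  intro l
  induction l with
  | nil => intro k _; simp
  | cons x l ih =>
    intro k hmem
    match k with
    | 0 => simp
    | 1 => simp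
    | k + 2 =>
      simp only [List.take_succ_cons, List.mem_cons, not_or] at hmem
      have hxc : (x != c) = true := by simp; exact fun he => hmem.1 he.symm
      simp only [List.filter_cons, hxc, if_true]
      have e : k + 2 - 1 = k + 1 := by omega
      rw [e, List.take_succ_cons, List.take_succ_cons]
      have := ih (k := k + 1) hmem.2
      simp only [Nat.add_sub_cancel] at this
      rw [this]

theorem scanHit_eq (k : Int) (c : String) : ∀ (r : List String) (seen : PySem.Set String),
    seen.Nodup → c ∉ seen →
    scanHit k c r seen
      = decide (c ∈ (ddf (r.filter (fun x => !(List.contains seen x)))).take (k - seen.length).toNat) := by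
  intro r
  induction r with
  | nil => intro seen _ _; simp [scanHit, ddf]
  | cons x rest ih =>
    intro seen hnd hc
    by_cases hxc : x = c
    · subst hxc
      have hcont : List.contains seen x = false := by
        simp only [List.contains_eq_mem, decide_eq_false_iff_not]; exact hc
      simp only [scanHit, beq_self_eq_true, if_true, List.filter_cons, hcont, Bool.not_false,
        if_true, ddf]
      have hlen : PySem.Set.len seen = (seen.length : Int) := by
        simp [PySem.Set.len]
      rw [hlen]
      have hnotin : x ∉ (ddf (rest.filter fun y => !seen.contains y)).filter (fun y => y != x) := by
        simp [List.mem_filter]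
      rcases hn : (k - (seen.length : Int)).toNat with _ | m
      · have : ¬ ((seen.length : Int) < k) := by omega
        simp [this]
      · have : (seen.length : Int) < k := by omega
        simp [this, List.take_succ_cons]
    · have hxc' : (x == c) = false := by simp [hxc]
      simp only [scanHit, hxc', Bool.false_eq_true, if_false]
      by_cases hx : x ∈ seen
      · rw [PySem.Set.add_of_mem hx, ih seen hnd hc]
        have hcont : List.contains seen x = true := by
          simp only [List.contains_eq_mem, decide_eq_true_iff]; exact hx
        simp only [List.filter_cons, hcont, Bool.not_true, Bool.false_eq_true, if_false]
      · rw [PySem.Set.add_of_not_mem hx]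
        have hnd' : (seen ++ [x]).Nodup := by
          simp [List.nodup_append, hnd]
          intro a ha h
          subst h; exact hx ha
        have hc' : c ∉ seen ++ [x] := by
          simp only [List.mem_append, List.mem_singleton, not_or]
          exact ⟨hc, fun h => hxc h.symm⟩
        rw [ih _ hnd' hc']
        have hcont : List.contains seen x = false := by
          simp only [List.contains_eq_mem, decide_eq_false_iff_not]; exact hx
        -- rewrite the filtered list on the RHS of the goal
        have hfilt : rest.filter (fun y => !(List.contains (seen ++ [x]) y))
            = (rest.filter (fun y => !(List.contains seen y))).filter (fun y => y != x) := by
          rw [List.filter_filter]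
          apply List.filter_congr
          intro y _
          simp only [List.contains_eq_mem, List.mem_append, List.mem_singleton]
          by_cases h1 : y ∈ seen <;> by_cases h2 : y = x <;> simp [h1, h2]
        rw [hfilt, ddf_filter]
        simp only [List.filter_cons, hcont, Bool.not_false, if_true, ddf]
        rcases hn : (k - (seen.length : Int)).toNat with _ | m
        · have h1 : (k - ((seen ++ [x]).length : Int)).toNat = 0 := by
            simp only [List.length_append, List.length_cons, List.length_nil]
            push_cast
            omega
          rw [h1]
          simp
        · have h1 : (k - ((seen ++ [x]).length : Int)).toNat = m := by
            simp only [List.length_append, List.length_cons, List.length_nil]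
            push_cast
            omega
          rw [h1, List.take_succ_cons]
          simp
          exact fun h => absurd h.symm hxc

theorem cache_step (k t : Int) (c : String) (L : List String) (kn : Nat)
    (hkn : k.toNat = kn) (hLnd : L.Nodup) :
    (if (L.take kn).reverse.contains c then
       (t + 1, ((PySem.List.remove? ((L.take kn).reverse) c).getD ((L.take kn).reverse)) ++ [c])
     else
       if k < ((((L.take kn).reverse ++ [c]).length : Nat) : Int) then
         (t + 5, ((L.take kn).reverse ++ [c]).drop 1)
       else (t + 5, (L.take kn).reverse ++ [c]))
    = (t + (if c ∈ L.take kn then 1 else 5),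
       ((c :: L.filter (fun y => y != c)).take kn).reverse) := by
  have htknd : (L.take kn).Nodup := (List.take_sublist kn L).nodup hLnd
  by_cases hm : c ∈ L.take kn
  · -- hit
    have hcont : (L.take kn).reverse.contains c = true := by
      simp only [List.contains_eq_mem, List.mem_reverse, decide_eq_true_iff]; exact hm
    have hmr : c ∈ (L.take kn).reverse := List.mem_reverse.2 hm
    rw [hcont, if_pos rfl, if_pos hm]
    rw [PySem.List.remove?_eq_some_erase _ c hmr, Option.getD_some,
        (List.nodup_reverse.mpr htknd).erase_eq_filter c, List.filter_reverse]
    have hne : kn ≠ 0 := by intro h; rw [h] at hm; simp at hm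
    obtain ⟨m, hkm⟩ : ∃ m, kn = m + 1 := ⟨kn - 1, by omega⟩
    subst hkm
    rw [List.take_succ_cons, List.reverse_cons]
    have h1 := take_filter_of_mem (c := c) (l := L) (k := m + 1) hLnd hm
    simp only [Nat.add_sub_cancel] at h1
    rw [h1]
  · -- miss
    have hcont : (L.take kn).reverse.contains c = false := by
      simp only [List.contains_eq_mem, List.mem_reverse, decide_eq_false_iff_not]; exact hm
    rw [hcont]
    simp only [Bool.false_eq_true, if_false, if_neg hm]
    by_cases hk0 : kn = 0
    · subst hk0
      simp only [List.take_zero, List.reverse_nil, List.nil_append,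
        List.drop_succ_cons, List.drop_nil]
      rw [if_pos (show k < (([c].length : Nat) : Int) by
        simp only [List.length_cons, List.length_nil]; omega)]
    · have hk1 : k = (kn : Int) := by omega
      by_cases hlen : kn ≤ L.length
      · -- cache full: pop
        have htl : (L.take kn).length = kn := by
          simp only [List.length_take]; omega
        have hkle : k < ((((L.take kn).reverse ++ [c]).length : Nat) : Int) := by
          simp only [List.length_append, List.length_reverse, htl, List.length_cons,
            List.length_nil]
          omega
        rw [if_pos hkle]
        obtain ⟨m, hkm⟩ : ∃ m, kn = m + 1 := ⟨kn - 1, by omega⟩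
        subst hkm
        rw [List.drop_append_of_le_length (by simp only [List.length_reverse, htl]; omega)]
        rw [List.take_succ_cons, List.reverse_cons]
        congr 1
        have h2 := take_filter_of_not_mem (c := c) (l := L) (k := m + 1) hm
        simp only [Nat.add_sub_cancel] at h2
        rw [h2, List.drop_one, List.tail_reverse]
        congr 1
        rw [List.dropLast_eq_take, List.take_take, List.length_take]
        have hmin : min (min (m + 1) L.length - 1) (m + 1) = m := by omega
        rw [hmin]
      · -- cache not full: no pop
        have htk : L.take kn = L := List.take_of_length_le (by omega)
        have hkgt : ¬ (k < ((((L.take kn).reverse ++ [c]).length : Nat) : Int)) := by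
          simp only [List.length_append, List.length_reverse, htk, List.length_cons,
            List.length_nil]
          omega
        rw [if_neg hkgt]
        have hm2 : c ∉ L := by simpa [htk] using hm
        have hfl : L.filter (fun y => y != c) = L := by
          apply List.filter_eq_self.2
          intro y hy
          simp only [bne_iff_ne, ne_eq]
          intro he; subst he; exact hm2 hy
        rw [hfl]
        have hwhole : (c :: L).take kn = c :: L := by
          apply List.take_of_length_le
          simp only [List.length_cons]
          omega
        rw [hwhole, List.reverse_cons, htk]

theorem stepA_inv (k t : Int) (city : String) (r : List String) :
    solutionStep k (t, cacheOf k r) city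
      = (t + (if PySem.Str.lower city ∈ (ddf r).take k.toNat then 1 else 5),
         cacheOf k (PySem.Str.lower city :: r)) := by
  have hddf : ddf (PySem.Str.lower city :: r)
      = PySem.Str.lower city :: (ddf r).filter (fun y => y != PySem.Str.lower city) := rfl
  simp only [solutionStep, cacheOf, hddf]
  exact cache_step k t (PySem.Str.lower city) (ddf r) k.toNat rfl (nodup_ddf r)

theorem scanHit_empty (k : Int) (c : String) (r : List String) :
    scanHit k c r PySem.Set.empty = decide (c ∈ (ddf r).take k.toNat) := by
  have h := scanHit_eq k c r PySem.Set.empty (by simp [PySem.Set.empty]) (by simp [PySem.Set.empty])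
  simpa [PySem.Set.empty] using h


theorem loop_eq (k : Int) : ∀ (rest : List String) (t : Int) (r : List String),
    (rest.foldl (solutionStep k) (t, cacheOf k r)).1
      = (rest.foldl (solutionAltStep k) (t, r)).1 := by
  intro rest
  induction rest with
  | nil => intro t r; rfl
  | cons city rest ih =>
    intro t r
    simp only [List.foldl_cons]
    rw [stepA_inv]
    have hs : solutionAltStep k (t, r) city
        = (t + (if PySem.Str.lower city ∈ (ddf r).take k.toNat then 1 else 5),
           PySem.Str.lower city :: r) := by
      simp only [solutionAltStep, scanHit_empty]
      simp only [decide_eq_true_eq]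
    rw [hs]
    exact ih _ (PySem.Str.lower city :: r)

theorem alt_zero : ∀ (cities : List String) (t : Int) (r : List String),
    (cities.foldl (solutionAltStep 0) (t, r)).1 = t + (cities.length : Int) * 5 := by
  intro cities
  induction cities with
  | nil => intro t r; simp
  | cons city rest ih =>
    intro t r
    simp only [List.foldl_cons]
    have hs : scanHit 0 (PySem.Str.lower city) r PySem.Set.empty = false := by
      rw [scanHit_empty]
      simp
    simp only [solutionAltStep, hs, Bool.false_eq_true, if_false, ih, List.length_cons]
    push_cast
    ring

-- ===== VERDICT (by name: the statement is the Claim_ definition above) =====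
theorem solution_spec : Claim_equal_solution := by
  intro k cities _
  unfold Spec_solution solution solution_alt
  by_cases h0 : k = 0
  · subst h0
    simp only [beq_self_eq_true, if_true]
    rw [alt_zero]; ring
  · have : (k == 0) = false := by simp [h0]
    rw [this]
    simp only [Bool.false_eq_true, if_false]
    have := loop_eq k cities 0 []
    simpa [cacheOf, ddf] using this
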